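-- pv_equiv track=rewrite | github.com/TamirOffen/OptimalChessAgent | GeneticAlgorithm/coevolution_training.py | knight_outpost_mult
-- ===== SOURCE A (Python) =====
-- def knight_outpost_mult(board, knights_array, pawns_array, opponent_pawns_array):
--   num_knight_outposts = 0
--
--   #check if defended
--   #check if can be attacked by enemy pawn
--   for knight_position in knights_array:
--     defended = False
--     unattackable = True
--
--
--     for pawn_position in pawns_array:
--       if (pawn_position[0] == knight_position[0] - 1):
--         if (pawn_position[1] == knight_position[1] + 1) or (pawn_position[1] == knight_position[1] - 1):
--           defended = True
--
--     for opponent_pawn_position in opponent_pawns_array: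
--       if (opponent_pawn_position[1] == knight_position[1] + 1) or (opponent_pawn_position[1] == knight_position[1] - 1):
--           if opponent_pawn_position[0] > knight_position[0]:
--             unattackable = False
--
--     if defended and unattackable:
--       num_knight_outposts += 1
--
--   return  num_knight_outposts
-- ===== SOURCE B (Python) =====
-- def knight_outpost_mult(board, knights_array, pawns_array, opponent_pawns_array):
--     pawn_set = {(p[0], p[1]) for p in pawns_array}
--     max_row = {}
--     for op in opponent_pawns_array:
--         c = op[1]
--         if c not in max_row or op[0] > max_row[c]:
--             max_row[c] = op[0]
--     count = 0
--     for k in knights_array: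
--         r, c = k[0], k[1]
--         defended = (r - 1, c + 1) in pawn_set or (r - 1, c - 1) in pawn_set
--         unattackable = max_row.get(c + 1, r) <= r and max_row.get(c - 1, r) <= r
--         if defended and unattackable:
--             count += 1
--     return count
-- ===== Notes on version B (the rewrite author's own statement) =====
-- stated objective: faster
-- what changed: Replaces the two inner scans per knight by a pawn-coordinate set and a per-column maximum-opponent-row dict built once, giving O(1) work per knight.
-- outside the precondition, e.g. on knight_outpost_mult(0, [[1]], [], []): A returns 0, B raises IndexError
import Mathlib
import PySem

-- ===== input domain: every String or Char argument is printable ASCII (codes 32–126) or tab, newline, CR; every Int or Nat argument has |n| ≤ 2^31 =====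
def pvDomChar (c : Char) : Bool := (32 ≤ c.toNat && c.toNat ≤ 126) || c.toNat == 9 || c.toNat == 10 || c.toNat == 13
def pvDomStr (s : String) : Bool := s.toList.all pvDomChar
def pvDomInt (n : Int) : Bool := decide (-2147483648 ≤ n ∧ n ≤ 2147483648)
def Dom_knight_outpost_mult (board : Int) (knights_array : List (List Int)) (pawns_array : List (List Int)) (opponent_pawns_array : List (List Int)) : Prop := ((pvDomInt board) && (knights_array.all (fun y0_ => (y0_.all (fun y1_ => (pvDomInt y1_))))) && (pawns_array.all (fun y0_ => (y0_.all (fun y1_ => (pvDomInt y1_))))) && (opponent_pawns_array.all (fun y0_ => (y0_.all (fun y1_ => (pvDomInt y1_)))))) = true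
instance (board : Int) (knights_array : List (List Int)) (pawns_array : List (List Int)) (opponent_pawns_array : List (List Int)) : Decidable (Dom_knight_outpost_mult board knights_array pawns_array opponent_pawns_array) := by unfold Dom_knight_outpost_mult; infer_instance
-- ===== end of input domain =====

-- B replaces A's two inner scans per knight by a pawn-coordinate set and a per-column
-- maximum-opponent-row dict built once (objective: faster, asymptotic).

-- xs[i] for a literal nonnegative index; exact under Pre_ (all coordinate lists have length ≥ 2,
-- so the indices 0 and 1 are in range and pyGet? never returns none).
def pvAt (l : List Int) (i : Int) : Int := (PySem.List.pyGet? l i).getD 0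

-- ===== PORT A =====
def knight_outpost_mult (board : Int) (knights_array : List (List Int)) (pawns_array : List (List Int)) (opponent_pawns_array : List (List Int)) : Int :=
  knights_array.foldl (fun num_knight_outposts knight_position =>
    let defended := pawns_array.foldl (fun defended pawn_position =>
      if pvAt pawn_position 0 = pvAt knight_position 0 - 1 then
        if pvAt pawn_position 1 = pvAt knight_position 1 + 1 ∨ pvAt pawn_position 1 = pvAt knight_position 1 - 1 then
          true
        else defended
      else defended) false
    let unattackable := opponent_pawns_array.foldl (fun unattackable opp =>
      if pvAt opp 1 = pvAt knight_position 1 + 1 ∨ pvAt opp 1 = pvAt knight_position 1 - 1 then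
        if pvAt opp 0 > pvAt knight_position 0 then false else unattackable
      else unattackable) true
    if defended && unattackable then num_knight_outposts + 1 else num_knight_outposts) 0

-- ===== PORT B =====
-- one step of Source B's max_row loop: if c not in max_row or op[0] > max_row[c]: max_row[c] = op[0]
def pvMaxRowStep (d : PySem.Dict Int Int) (op : List Int) : PySem.Dict Int Int :=
  if d.contains (pvAt op 1) = false ∨ pvAt op 0 > d.getD (pvAt op 1) 0 then
    d.insert (pvAt op 1) (pvAt op 0)
  else d

def knight_outpost_mult_alt (board : Int) (knights_array : List (List Int)) (pawns_array : List (List Int)) (opponent_pawns_array : List (List Int)) : Int :=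
  let pawn_set : PySem.Set (Int × Int) := PySem.Set.ofList (pawns_array.map (fun p => (pvAt p 0, pvAt p 1)))
  let max_row : PySem.Dict Int Int := opponent_pawns_array.foldl pvMaxRowStep PySem.Dict.empty
  knights_array.foldl (fun count k =>
    let r := pvAt k 0
    let c := pvAt k 1
    let defended := pawn_set.contains (r - 1, c + 1) || pawn_set.contains (r - 1, c - 1)
    let unattackable := decide (max_row.getD (c + 1) r ≤ r) && decide (max_row.getD (c - 1) r ≤ r)
    if defended && unattackable then count + 1 else count) 0

-- ===== PRECONDITION & SPEC =====
-- Pre_ excludes inputs containing a coordinate list of fewer than two elements: on those A raises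
-- IndexError whenever an inner loop reaches the missing index, and the remaining such inputs
-- (a short list the loops never index, e.g. a 1-element knight with both pawn arrays empty)
-- are outside the function's natural [row, column] domain, where B raises IndexError itself.
def Pre_knight_outpost_mult (board : Int) (knights_array : List (List Int)) (pawns_array : List (List Int)) (opponent_pawns_array : List (List Int)) : Prop :=
  (∀ k ∈ knights_array, 2 ≤ k.length) ∧ (∀ p ∈ pawns_array, 2 ≤ p.length) ∧ (∀ o ∈ opponent_pawns_array, 2 ≤ o.length)
instance (board : Int) (knights_array : List (List Int)) (pawns_array : List (List Int)) (opponent_pawns_array : List (List Int)) : Decidable (Pre_knight_outpost_mult board knights_array pawns_array opponent_pawns_array) := by unfold Pre_knight_outpost_mult; infer_instance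

def pvWitness_knight_outpost_mult : Int × List (List Int) × List (List Int) × List (List Int) :=
  (0, [[3, 3]], [[2, 4]], [[5, 1]])

def Spec_knight_outpost_mult (board : Int) (knights_array : List (List Int)) (pawns_array : List (List Int)) (opponent_pawns_array : List (List Int)) (out : Int) : Prop := out = knight_outpost_mult_alt board knights_array pawns_array opponent_pawns_array
instance (board : Int) (knights_array : List (List Int)) (pawns_array : List (List Int)) (opponent_pawns_array : List (List Int)) (out : Int) : Decidable (Spec_knight_outpost_mult board knights_array pawns_array opponent_pawns_array out) := by unfold Spec_knight_outpost_mult; infer_instance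

-- ===== CLAIM (what is proved, stated in full; the proofs are below) =====
def Claim_equal_knight_outpost_mult : Prop := ∀ (board : Int) (knights_array : List (List Int)) (pawns_array : List (List Int)) (opponent_pawns_array : List (List Int)), Dom_knight_outpost_mult board knights_array pawns_array opponent_pawns_array → Pre_knight_outpost_mult board knights_array pawns_array opponent_pawns_array → Spec_knight_outpost_mult board knights_array pawns_array opponent_pawns_array (knight_outpost_mult board knights_array pawns_array opponent_pawns_array)

-- ===== LEMMAS AND PROOFS =====

-- A's defended loop returns true iff some pawn sits on one of the two defending squares.
theorem foldD_true (r c : Int) (ps : List (List Int)) (d : Bool) :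
    (ps.foldl (fun defended p =>
      if pvAt p 0 = r - 1 then
        if pvAt p 1 = c + 1 ∨ pvAt p 1 = c - 1 then true else defended
      else defended) d) = true ↔
    (d = true ∨ ∃ p ∈ ps, pvAt p 0 = r - 1 ∧ (pvAt p 1 = c + 1 ∨ pvAt p 1 = c - 1)) := by
  induction ps generalizing d with
  | nil => simp
  | cons p ps ih =>
    simp only [List.foldl_cons, List.mem_cons]
    by_cases h0 : pvAt p 0 = r - 1
    · by_cases h1 : pvAt p 1 = c + 1 ∨ pvAt p 1 = c - 1
      · rw [if_pos h0, if_pos h1, ih]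
        constructor
        · intro _; exact Or.inr ⟨p, Or.inl rfl, h0, h1⟩
        · intro _; exact Or.inl rfl
      · rw [if_pos h0, if_neg h1, ih]
        constructor
        · rintro (hd | ⟨q, hq, hh⟩)
          · exact Or.inl hd
          · exact Or.inr ⟨q, Or.inr hq, hh⟩
        · rintro (hd | ⟨q, (rfl | hq), hh⟩)
          · exact Or.inl hd
          · exact absurd hh.2 h1
          · exact Or.inr ⟨q, hq, hh⟩
    · rw [if_neg h0, ih]
      constructor
      · rintro (hd | ⟨q, hq, hh⟩)
        · exact Or.inl hd
        · exact Or.inr ⟨q, Or.inr hq, hh⟩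
      · rintro (hd | ⟨q, (rfl | hq), hh⟩)
        · exact Or.inl hd
        · exact absurd hh.1 h0
        · exact Or.inr ⟨q, hq, hh⟩

-- A's unattackable loop returns true iff no opponent pawn on an adjacent column is above the knight.
theorem foldU_true (r c : Int) (ops : List (List Int)) (u : Bool) :
    (ops.foldl (fun unatt o =>
      if pvAt o 1 = c + 1 ∨ pvAt o 1 = c - 1 then
        if pvAt o 0 > r then false else unatt
      else unatt) u) = true ↔
    (u = true ∧ ∀ o ∈ ops, (pvAt o 1 = c + 1 ∨ pvAt o 1 = c - 1) → pvAt o 0 ≤ r) := by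
  induction ops generalizing u with
  | nil => simp
  | cons o ops ih =>
    simp only [List.foldl_cons, List.mem_cons]
    by_cases h1 : pvAt o 1 = c + 1 ∨ pvAt o 1 = c - 1
    · by_cases h0 : pvAt o 0 > r
      · rw [if_pos h1, if_pos h0, ih]
        constructor
        · rintro ⟨h, -⟩; exact absurd h (by simp)
        · rintro ⟨-, hall⟩; exact absurd (hall o (Or.inl rfl) h1) (by omega)
      · rw [if_pos h1, if_neg h0, ih]
        constructor
        · rintro ⟨hu, hall⟩
          refine ⟨hu, fun x hx => ?_⟩
          rcases hx with rfl | hx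
          · intro _; omega
          · exact hall x hx
        · rintro ⟨hu, hall⟩
          exact ⟨hu, fun x hx => hall x (Or.inr hx)⟩
    · rw [if_neg h1, ih]
      constructor
      · rintro ⟨hu, hall⟩
        refine ⟨hu, fun x hx => ?_⟩
        rcases hx with rfl | hx
        · intro h; exact absurd h h1
        · exact hall x hx
      · rintro ⟨hu, hall⟩
        exact ⟨hu, fun x hx => hall x (Or.inr hx)⟩

-- one step of the max_row build preserves the "column maximum ≤ r" characterisation
theorem maxRowStep_getD (d : PySem.Dict Int Int) (o : List Int) (col r : Int) :
    ((pvMaxRowStep d o).getD col r ≤ r) ↔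
    (d.getD col r ≤ r ∧ (pvAt o 1 = col → pvAt o 0 ≤ r)) := by
  unfold pvMaxRowStep
  by_cases hc : pvAt o 1 = col
  · subst hc
    by_cases hmem : d.contains (pvAt o 1) = true
    · have hs : (d.get? (pvAt o 1)).isSome = true := by
        rw [← PySem.Dict.contains_eq_isSome_get? d (pvAt o 1)]; exact hmem
      rcases Option.isSome_iff_exists.mp hs with ⟨m, hm⟩
      have hgd : ∀ x : Int, d.getD (pvAt o 1) x = m := fun x => PySem.Dict.getD_of_get?_eq_some d x hm
      by_cases hgt : pvAt o 0 > d.getD (pvAt o 1) 0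
      · rw [if_pos (Or.inr hgt), PySem.Dict.getD_insert_self]
        rw [hgd 0] at hgt
        rw [hgd r]
        constructor
        · intro h; exact ⟨by omega, fun _ => h⟩
        · intro ⟨_, h⟩; exact h rfl
      · rw [if_neg (by simp [hmem, hgt])]
        rw [hgd 0] at hgt
        rw [hgd r]
        constructor
        · intro h; exact ⟨h, fun _ => by omega⟩
        · intro ⟨h, _⟩; exact h
    · have hmem' : d.contains (pvAt o 1) = false := by
        cases h : d.contains (pvAt o 1) with
        | false => rfl
        | true => exact absurd h hmem
      rw [if_pos (Or.inl hmem'), PySem.Dict.getD_insert_self,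
        PySem.Dict.getD_of_not_contains d r hmem']
      constructor
      · intro h; exact ⟨le_refl r, fun _ => h⟩
      · intro ⟨_, h⟩; exact h rfl
  · have hunch : (if d.contains (pvAt o 1) = false ∨ pvAt o 0 > d.getD (pvAt o 1) 0 then d.insert (pvAt o 1) (pvAt o 0) else d).getD col r = d.getD col r := by
      split
      · exact PySem.Dict.getD_insert_of_ne d _ _ (fun h => hc h.symm)
      · rfl
    rw [hunch]
    constructor
    · intro h; exact ⟨h, fun h' => absurd h' hc⟩
    · intro ⟨h, _⟩; exact h

-- the built max_row dict characterises "no opponent pawn in this column is above row r"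
theorem maxRow_getD (ops : List (List Int)) (d : PySem.Dict Int Int) (col r : Int) :
    ((ops.foldl pvMaxRowStep d).getD col r ≤ r) ↔
    (d.getD col r ≤ r ∧ ∀ o ∈ ops, pvAt o 1 = col → pvAt o 0 ≤ r) := by
  induction ops generalizing d with
  | nil => simp
  | cons o ops ih =>
    simp only [List.foldl_cons, List.mem_cons]
    rw [ih, maxRowStep_getD]
    constructor
    · rintro ⟨⟨hd, ho⟩, hall⟩
      refine ⟨hd, fun x hx => ?_⟩
      rcases hx with rfl | hx
      · exact ho
      · exact hall x hx
    · rintro ⟨hd, hall⟩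
      exact ⟨⟨hd, hall o (Or.inl rfl)⟩, fun x hx => hall x (Or.inr hx)⟩

-- per-knight: A's two scans and B's indexed lookups produce the same pair of booleans
theorem body_eq (ps ops : List (List Int)) (k : List Int) :
    ((ps.foldl (fun defended p =>
        if pvAt p 0 = pvAt k 0 - 1 then
          if pvAt p 1 = pvAt k 1 + 1 ∨ pvAt p 1 = pvAt k 1 - 1 then true else defended
        else defended) false) &&
     (ops.foldl (fun unatt o =>
        if pvAt o 1 = pvAt k 1 + 1 ∨ pvAt o 1 = pvAt k 1 - 1 then
          if pvAt o 0 > pvAt k 0 then false else unatt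
        else unatt) true)) =
    (((PySem.Set.ofList (ps.map (fun p => (pvAt p 0, pvAt p 1)))).contains (pvAt k 0 - 1, pvAt k 1 + 1) ||
      (PySem.Set.ofList (ps.map (fun p => (pvAt p 0, pvAt p 1)))).contains (pvAt k 0 - 1, pvAt k 1 - 1)) &&
     (decide ((ops.foldl pvMaxRowStep PySem.Dict.empty).getD (pvAt k 1 + 1) (pvAt k 0) ≤ pvAt k 0) &&
      decide ((ops.foldl pvMaxRowStep PySem.Dict.empty).getD (pvAt k 1 - 1) (pvAt k 0) ≤ pvAt k 0))) := by
  have hd : ∀ a b : Bool, (a = true ↔ b = true) → a = b := by decide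
  apply hd
  simp only [Bool.and_eq_true, Bool.or_eq_true, decide_eq_true_eq,
    foldD_true (pvAt k 0) (pvAt k 1), foldU_true (pvAt k 0) (pvAt k 1),
    maxRow_getD, PySem.Dict.getD_empty,
    PySem.Set.contains_iff, PySem.Set.mem_ofList, List.mem_map]
  constructor
  · rintro ⟨hdef, -, hun⟩
    rcases hdef with h | ⟨p, hp, h0, h1 | h1⟩
    · simp at h
    · exact ⟨Or.inl ⟨p, hp, by rw [h0, h1]⟩,
        ⟨le_refl _, fun o ho h => hun o ho (Or.inl h)⟩,
        ⟨le_refl _, fun o ho h => hun o ho (Or.inr h)⟩⟩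
    · exact ⟨Or.inr ⟨p, hp, by rw [h0, h1]⟩,
        ⟨le_refl _, fun o ho h => hun o ho (Or.inl h)⟩,
        ⟨le_refl _, fun o ho h => hun o ho (Or.inr h)⟩⟩
  · rintro ⟨hdef, ⟨-, h1⟩, ⟨-, h2⟩⟩
    refine ⟨?_, trivial, fun o ho h => ?_⟩
    · rcases hdef with ⟨p, hp, he⟩ | ⟨p, hp, he⟩
      · exact Or.inr ⟨p, hp, congrArg Prod.fst he, Or.inl (congrArg Prod.snd he)⟩
      · exact Or.inr ⟨p, hp, congrArg Prod.fst he, Or.inr (congrArg Prod.snd he)⟩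
    · rcases h with h | h
      · exact h1 o ho h
      · exact h2 o ho h

-- ===== VERDICT (by name: the statement is the Claim_ definition above) =====
theorem knight_outpost_mult_spec : Claim_equal_knight_outpost_mult := by
  intro board ks ps ops _ _
  unfold Spec_knight_outpost_mult knight_outpost_mult knight_outpost_mult_alt
  simp only []
  refine List.foldl_ext _ _ 0 (fun a k _ => ?_)
  rw [body_eq ps ops k]
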